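-- pv_equiv track=rewrite | github.com/SwathiBalasubramanyam/dsapython | freq_letters.py | frequent_letters
-- ===== SOURCE A (Python) =====
-- def frequent_letters(string):
--     # your code here
--     from collections import defaultdict
--     char_cnt = defaultdict(int)
--     lst = []
--
--     for char in string:
--         char_cnt[char] += 1
--         if char_cnt[char] > 2 and char not in lst:
--             lst.append(char)
--
--     return lst
-- ===== SOURCE B (Python) =====
-- def frequent_letters(string):
--     # Staged: index each char's occurrence positions, select those with >2,
--     # then order the winners by the position of their third occurrence.
--     positions = {}
--     for i, ch in enumerate(string):
--         positions.setdefault(ch, []).append(i)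
--     frequent = [ch for ch, idx in positions.items() if len(idx) > 2]
--     frequent.sort(key=lambda ch: positions[ch][2])
--     return frequent
-- ===== Notes on version B (the rewrite author's own statement) =====
-- stated objective: alternative
-- what changed: Replaces A's single emit-on-third-occurrence scan with staged passes: build a char->index-list positions map, select chars with more than two occurrences, then sort the winners by the index of their third occurrence.
import Mathlib
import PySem

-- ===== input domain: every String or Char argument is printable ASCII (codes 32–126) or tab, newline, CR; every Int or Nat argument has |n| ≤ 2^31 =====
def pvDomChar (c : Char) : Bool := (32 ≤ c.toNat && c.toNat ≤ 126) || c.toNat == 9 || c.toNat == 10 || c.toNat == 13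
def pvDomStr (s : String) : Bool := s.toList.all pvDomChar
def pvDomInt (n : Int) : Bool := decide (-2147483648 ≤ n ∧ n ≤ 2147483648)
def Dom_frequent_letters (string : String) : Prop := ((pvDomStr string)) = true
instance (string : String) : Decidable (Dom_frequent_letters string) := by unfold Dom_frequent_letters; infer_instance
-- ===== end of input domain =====

-- B replaces A's emit-on-third-occurrence scan with staged passes: a char->index-list
-- positions map, selection of chars with more than two occurrences, and a sort of the
-- winners by the index of their third occurrence; same return value (both total).

-- ===== PORT A =====
def fl_step (st : PySem.Dict Char Int × List String) (ch : Char) :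
    PySem.Dict Char Int × List String :=
  let cc := st.1.modify ch 0 (· + 1)
  if 2 < cc.getD ch 0 ∧ String.ofList [ch] ∉ st.2 then (cc, st.2 ++ [String.ofList [ch]])
  else (cc, st.2)

def frequent_letters (string : String) : List String :=
  (string.toList.foldl fl_step (PySem.Dict.empty, [])).2

-- ===== PORT B =====
-- positions = {}; for i, ch in enumerate(string): positions.setdefault(ch, []).append(i)
def fl_positions (l : List Char) : PySem.Dict Char (List Int) :=
  (PySem.List.enumerate l 0).foldl (fun d p => d.modify p.2 [] (· ++ [p.1])) PySem.Dict.empty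

def frequent_letters_alt (string : String) : List String :=
  let l := string.toList
  let d := fl_positions l
  let frequent := (d.items.filter (fun kv => 2 < kv.2.length)).map (·.1)
  (PySem.List.sorted frequent (fun ch => PySem.List.pyGetD (d.getD ch []) 2 0) false).map
    (fun ch => String.ofList [ch])

-- ===== PRECONDITION & SPEC =====
def Spec_frequent_letters (string : String) (out : List String) : Prop := out = frequent_letters_alt string
instance (string : String) (out : List String) : Decidable (Spec_frequent_letters string out) := by unfold Spec_frequent_letters; infer_instance

-- ===== CLAIM (what is proved, stated in full; the proofs are below) =====
def Claim_equal_frequent_letters : Prop := ∀ (string : String), Dom_frequent_letters string → Spec_frequent_letters string (frequent_letters string)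

-- ===== LEMMAS AND PROOFS =====

-- the pairs of enumerate l selected at their character's third occurrence
def fl_pairs (l : List Char) : List (Int × Char) :=
  (PySem.List.enumerate l 0).filter
    (fun p => (PySem.List.slice l none (some (p.1 + 1))).count p.2 == 3)

def fl_chars (l : List Char) : List Char := (fl_pairs l).map (·.2)

def fl_sel (l : List Char) : List String := (fl_chars l).map (fun c => String.ofList [c])

-- index list of c's occurrences in l
def fl_idxs (l : List Char) (c : Char) : List Int :=
  ((PySem.List.enumerate l 0).filter (fun p => p.2 == c)).map (·.1)

lemma ofList_single_inj (a c : Char) : String.ofList [a] = String.ofList [c] ↔ a = c := by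
  constructor
  · intro h
    have h2 := congrArg String.toList h
    simpa using h2
  · rintro rfl; rfl

lemma fl_sel_eq (l : List Char) :
    fl_sel l = (fl_pairs l).map (fun p => String.ofList [p.2]) := by
  simp [fl_sel, fl_chars, List.map_map, Function.comp]

lemma fl_pairs_append (p : List Char) (c : Char) :
    fl_pairs (p ++ [c]) =
      fl_pairs p ++ (if (p ++ [c]).count c = 3 then [((p.length : Int), c)] else []) := by
  unfold fl_pairs
  rw [PySem.List.enumerate_append, List.filter_append]
  congr 1
  · -- prefix part: the slice of p ++ [c] agrees with the slice of p on indices of p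
    apply List.filter_congr
    intro q hq
    rcases (PySem.List.mem_enumerate_iff _ _ _).1 hq with ⟨k, hk, rfl⟩
    simp only [zero_add]
    have h1 : ((k : Int) + 1) = ((k + 1 : Nat) : Int) := by push_cast; ring
    rw [h1, PySem.List.slice_to_natCast, PySem.List.slice_to_natCast,
      List.take_append_of_le_length (by omega)]
  · -- the new element (index p.length)
    simp only [PySem.List.enumerate_cons, PySem.List.enumerate_nil, List.filter_cons,
      List.filter_nil, zero_add]
    have h1 : ((p.length : Int) + 1) = ((p.length + 1 : Nat) : Int) := by push_cast; ring
    rw [h1, PySem.List.slice_to_natCast]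
    have h2 : (p ++ [c]).take (p.length + 1) = p ++ [c] := by
      apply List.take_of_length_le; simp
    rw [h2]
    by_cases h : (p ++ [c]).count c = 3
    · simp [h]
    · simp [h]

lemma mem_fl_chars (p : List Char) (a : Char) :
    a ∈ fl_chars p ↔ 3 ≤ p.count a := by
  induction p using List.reverseRecOn with
  | nil => simp [fl_chars, fl_pairs, PySem.List.enumerate_nil]
  | append_singleton q c ih =>
    unfold fl_chars at *
    rw [fl_pairs_append, List.map_append, List.mem_append, ih]
    by_cases hac : a = c
    · subst hac
      have h1 : (q ++ [a]).count a = q.count a + 1 := by simp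
      rw [h1]
      by_cases h : q.count a + 1 = 3 <;> simp [h] <;> omega
    · have h0 : List.count a [c] = 0 := List.count_eq_zero.mpr (by simp [hac])
      have h1 : List.count a (q ++ [c]) = List.count a q := by
        simp [List.count_append, h0]
      rw [h1]
      by_cases h : List.count c (q ++ [c]) = 3 <;> simp [h, hac]

lemma mem_fl_sel (p : List Char) (a : Char) :
    String.ofList [a] ∈ fl_sel p ↔ 3 ≤ p.count a := by
  rw [← mem_fl_chars]
  unfold fl_sel
  constructor
  · intro h
    rcases List.mem_map.1 h with ⟨b, hb, he⟩
    exact (ofList_single_inj b a).1 he ▸ hb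
  · intro h; exact List.mem_map_of_mem h

-- ===== A's fold computes fl_sel =====
lemma fl_fold_eq (l : List Char) :
    l.foldl fl_step (PySem.Dict.empty, ([] : List String)) =
      (PySem.Dict.counter l, fl_sel l) := by
  induction l using List.reverseRecOn with
  | nil => rfl
  | append_singleton p c ih =>
    have hcnt : PySem.Dict.counter (p ++ [c]) =
        (PySem.Dict.counter p).modify c 0 (· + 1) := by
      rw [PySem.Dict.counter_eq_foldl, List.foldl_append]
      simp [PySem.Dict.counter_eq_foldl]
    have hget : ((PySem.Dict.counter p).modify c 0 (· + 1)).getD c 0 =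
        (p.count c : Int) + 1 := by
      rw [PySem.Dict.getD_modify_self, PySem.Dict.getD_counter]
    have hcountapp : (p ++ [c]).count c = p.count c + 1 := by
      simp [List.count_append]
    have hsel : fl_sel (p ++ [c]) =
        fl_sel p ++ (if (p ++ [c]).count c = 3 then [String.ofList [c]] else []) := by
      rw [fl_sel_eq, fl_pairs_append, List.map_append, ← fl_sel_eq]
      congr 1
      split <;> simp
    rw [List.foldl_append, ih]
    simp only [List.foldl_cons, List.foldl_nil, fl_step, hget]
    rw [hsel, hcountapp, hcnt]
    by_cases h3 : p.count c + 1 = 3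
    · have hnm : String.ofList [c] ∉ fl_sel p := by rw [mem_fl_sel]; omega
      rw [if_pos ⟨by omega, hnm⟩, if_pos h3]
    · rw [if_neg h3]
      by_cases hm : String.ofList [c] ∈ fl_sel p
      · rw [if_neg (fun hc => hc.2 hm)]
        simp
      · have hsmall : p.count c < 3 := by
          by_contra hge
          exact hm ((mem_fl_sel p c).mpr (by omega))
        have hcond : ¬(2 < (p.count c : Int) + 1 ∧ String.ofList [c] ∉ fl_sel p) := by
          rintro ⟨hlt, -⟩
          omega
        rw [if_neg hcond]
        simp

-- ===== B's positions dict =====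
lemma getD_fl_positions (l : List Char) (c : Char) :
    (fl_positions l).getD c [] = fl_idxs l c := by
  unfold fl_positions fl_idxs
  have hb : (PySem.List.enumerate l 0).foldl (fun d p => d.modify p.2 [] (· ++ [p.1]))
        PySem.Dict.empty =
      ((PySem.List.enumerate l 0).map Prod.swap).foldl
        (fun d p => d.modify p.1 [] (· ++ [p.2])) PySem.Dict.empty := by
    rw [List.foldl_map]
    simp
  rw [hb, PySem.Dict.getD_foldl_modify_append, PySem.Dict.getD_empty]
  rw [List.filter_map, List.map_map]
  simp only [Function.comp_def, Prod.fst_swap, Prod.snd_swap, List.nil_append]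

lemma keys_fl_positions (l : List Char) :
    (fl_positions l).keys = PySem.Set.ofList l := by
  unfold fl_positions
  rw [PySem.Dict.keys_foldl_modify_key]
  rw [PySem.Dict.keys_empty, PySem.List.map_snd_enumerate]
  rfl

lemma nodup_keys_fl_positions (l : List Char) : (fl_positions l).keys.Nodup := by
  unfold fl_positions
  exact PySem.Dict.nodup_keys_foldl_modify_key _ _ _ _ _ PySem.Dict.nodup_keys_empty

lemma length_fl_idxs (l : List Char) (c : Char) :
    (fl_idxs l c).length = l.count c := by
  unfold fl_idxs
  rw [List.length_map]
  have h := PySem.List.map_snd_enumerate l (0 : Int)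
  calc (List.filter (fun p => p.2 == c) (PySem.List.enumerate l 0)).length
      = (PySem.List.enumerate l 0).countP (fun p => p.2 == c) := by
        rw [List.countP_eq_length_filter]
    _ = ((PySem.List.enumerate l 0).map (·.2)).countP (· == c) := by
        rw [List.countP_map]; rfl
    _ = l.count c := by rw [h]; rfl

lemma fl_idxs_append (p : List Char) (c c' : Char) :
    fl_idxs (p ++ [c']) c =
      fl_idxs p c ++ (if c' = c then [((p.length : Int))] else []) := by
  unfold fl_idxs
  rw [PySem.List.enumerate_append, List.filter_append, List.map_append]
  congr 1
  simp only [PySem.List.enumerate_cons, PySem.List.enumerate_nil, List.filter_cons,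
    List.filter_nil, zero_add]
  by_cases h : c' = c <;> simp [h]

-- the crux: the (j+1)-th occurrence position of c is fl_idxs[j]
lemma pyGetD_fl_idxs (l : List Char) (c : Char) (k j : Nat) (hk : k < l.length)
    (hc : l[k] = c) (hj : (l.take (k + 1)).count c = j + 1) :
    PySem.List.pyGetD (fl_idxs l c) (j : Int) 0 = (k : Int) := by
  induction l using List.reverseRecOn generalizing k with
  | nil => simp at hk
  | append_singleton p c' ih =>
    rcases Nat.lt_or_ge k p.length with hlt | hge
    · -- inside the prefix
      have htake : (p ++ [c']).take (k + 1) = p.take (k + 1) :=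
        List.take_append_of_le_length (by omega)
      have hc' : p[k] = c := by
        rw [← hc]; exact (List.getElem_append_left hlt).symm
      have hj' : (p.take (k + 1)).count c = j + 1 := by rw [← htake]; exact hj
      have ihk := ih k hlt hc' hj'
      have hjlen : j < (fl_idxs p c).length := by
        rw [length_fl_idxs]
        have hsub : (p.take (k + 1)).Sublist p := List.take_sublist _ _
        have := hsub.count_le c
        omega
      rw [fl_idxs_append]
      have hlen2 : j < (fl_idxs p c ++ (if c' = c then [((p.length : Int))] else [])).length := by
        rw [List.length_append]; omega
      rw [PySem.List.pyGetD_eq_getElem _ 0 (by exact_mod_cast Nat.zero_le j) (by exact_mod_cast hlen2)]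
      rw [PySem.List.pyGetD_eq_getElem _ 0 (by exact_mod_cast Nat.zero_le j) (by exact_mod_cast hjlen)] at ihk
      simp only [Int.toNat_natCast] at ihk ⊢
      rw [List.getElem_append_left hjlen]
      exact ihk
    · -- k is the new last position
      have hk' : k = p.length := by
        have : k < p.length + 1 := by simpa using hk
        omega
      subst hk'
      have hcc : c' = c := by
        rw [← hc]; simp
      subst hcc
      have htake : (p ++ [c']).take (p.length + 1) = p ++ [c'] := by
        apply List.take_of_length_le; simp
      have hcount : (p ++ [c']).count c' = p.count c' + 1 := by simp
      have hjval : j = p.count c' := by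
        rw [htake, hcount] at hj; omega
      rw [fl_idxs_append, if_pos rfl]
      have hlen : j < (fl_idxs p c' ++ [((p.length : Int))]).length := by
        simp [length_fl_idxs]; omega
      rw [PySem.List.pyGetD_eq_getElem _ 0 (by exact_mod_cast Nat.zero_le j) (by exact_mod_cast hlen)]
      have : (fl_idxs p c').length = j := by rw [length_fl_idxs, hjval]
      simp only [Int.toNat_natCast]
      rw [List.getElem_append_right (by omega)]
      simp [this]

-- for any selected pair, the sort key of its char is its index
lemma key_of_mem_fl_pairs (l : List Char) (q : Int × Char) (hq : q ∈ fl_pairs l) :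
    PySem.List.pyGetD (fl_idxs l q.2) 2 0 = q.1 := by
  unfold fl_pairs at hq
  rcases List.mem_filter.1 hq with ⟨hmem, hpred⟩
  rcases (PySem.List.mem_enumerate_iff _ _ _).1 hmem with ⟨k, hk, rfl⟩
  simp only [zero_add] at *
  have h1 : ((k : Int) + 1) = ((k + 1 : Nat) : Int) := by push_cast; ring
  rw [h1, PySem.List.slice_to_natCast] at hpred
  have h3 : (l.take (k + 1)).count l[k] = 3 := by
    exact_mod_cast (beq_iff_eq).1 hpred
  have := pyGetD_fl_idxs l l[k] k 2 hk rfl h3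
  exact_mod_cast this

lemma pairwise_key_fl_chars (l : List Char) :
    (fl_chars l).Pairwise
      (fun a b => PySem.List.pyGetD (fl_idxs l a) 2 0 < PySem.List.pyGetD (fl_idxs l b) 2 0) := by
  unfold fl_chars
  rw [List.pairwise_map]
  have hpw : (fl_pairs l).Pairwise (fun p q => p.1 < q.1) :=
    (PySem.List.pairwise_lt_enumerate l 0).filter _
  exact hpw.imp_of_mem (fun {p q} hp hq h => by
    rw [key_of_mem_fl_pairs l p hp, key_of_mem_fl_pairs l q hq]; exact h)

lemma nodup_fl_chars (l : List Char) : (fl_chars l).Nodup := by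
  have h := pairwise_key_fl_chars l
  exact h.imp (fun {a b} hab => by rintro rfl; exact lt_irrefl _ hab)

-- B's "frequent" list is the keys with count ≥ 3
lemma frequent_eq (l : List Char) :
    ((fl_positions l).items.filter (fun kv => 2 < kv.2.length)).map (·.1) =
      (fl_positions l).keys.filter (fun c => 2 < l.count c) := by
  rw [PySem.Dict.items_eq_map_keys (fl_positions l) (nodup_keys_fl_positions l) []]
  rw [List.filter_map, List.map_map]
  have : ((fun kv : Char × List Int => decide (2 < kv.2.length)) ∘
      fun k => (k, (fl_positions l).getD k [])) =
      fun c => decide (2 < l.count c) := by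
    funext c
    simp [Function.comp, getD_fl_positions, length_fl_idxs]
  rw [this]
  simp [Function.comp_def]

lemma mem_frequent (l : List Char) (c : Char) :
    c ∈ (fl_positions l).keys.filter (fun c => 2 < l.count c) ↔ 3 ≤ l.count c := by
  rw [List.mem_filter, keys_fl_positions, PySem.Set.mem_ofList]
  constructor
  · intro ⟨_, h⟩; simpa using h
  · intro h
    exact ⟨List.count_pos_iff.1 (by omega), by simpa using h⟩

lemma nodup_frequent (l : List Char) :
    ((fl_positions l).keys.filter (fun c => 2 < l.count c)).Nodup :=
  (nodup_keys_fl_positions l).filter _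

lemma sorted_frequent_eq (l : List Char) :
    PySem.List.sorted ((fl_positions l).keys.filter (fun c => 2 < l.count c))
      (fun ch => PySem.List.pyGetD (fl_idxs l ch) 2 0) false = fl_chars l := by
  apply PySem.List.sorted_eq_of_perm_of_pairwise_lt
  · rw [List.perm_ext_iff_of_nodup (nodup_fl_chars l) (nodup_frequent l)]
    intro a
    rw [mem_fl_chars, mem_frequent]
  · exact pairwise_key_fl_chars l

-- ===== VERDICT (by name: the statement is the Claim_ definition above) =====
theorem frequent_letters_spec : Claim_equal_frequent_letters := by
  intro s _
  unfold Spec_frequent_letters frequent_letters frequent_letters_alt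
  rw [fl_fold_eq]
  simp only [getD_fl_positions, frequent_eq, sorted_frequent_eq]
  rfl
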